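-- pv_equiv track=rewrite | github.com/DovydasMen/codewars | plastci_balance.py | plastic_balance
-- ===== SOURCE A (Python) =====
-- def plastic_balance(lst):
--     on = True
--     while on:
--         if len(lst) == 1:
--             if lst[0] + lst[0] != 0:
--                 return []
--             else:
--                 return lst
--         if lst == []:
--             return []
--         if lst[0] + lst[-1] != sum(lst[1:-1]):
--             del lst[0]
--             del lst[-1]
--             continue
--         if lst[0] + lst[-1] == sum(lst[1:-1]):
--             return lst
-- ===== SOURCE B (Python) =====
-- def plastic_balance(lst):
--     total = sum(lst)
--     i, j = 0, len(lst) - 1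
--     while i < j:
--         ends = lst[i] + lst[j]
--         if ends == total - ends:
--             return lst[i:j + 1]
--         total -= ends
--         i += 1
--         j -= 1
--     if i == j and lst[i] == 0:
--         return [lst[i]]
--     return []
-- ===== Notes on version B (the rewrite author's own statement) =====
-- stated objective: faster
-- what changed: Replaces A's repeated O(n) sum(lst[1:-1]) and in-place end deletions per iteration with a single precomputed total maintained incrementally and two indices, trimming virtually; A mutates its argument (del), B does not (return value is identical).
import Mathlib
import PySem

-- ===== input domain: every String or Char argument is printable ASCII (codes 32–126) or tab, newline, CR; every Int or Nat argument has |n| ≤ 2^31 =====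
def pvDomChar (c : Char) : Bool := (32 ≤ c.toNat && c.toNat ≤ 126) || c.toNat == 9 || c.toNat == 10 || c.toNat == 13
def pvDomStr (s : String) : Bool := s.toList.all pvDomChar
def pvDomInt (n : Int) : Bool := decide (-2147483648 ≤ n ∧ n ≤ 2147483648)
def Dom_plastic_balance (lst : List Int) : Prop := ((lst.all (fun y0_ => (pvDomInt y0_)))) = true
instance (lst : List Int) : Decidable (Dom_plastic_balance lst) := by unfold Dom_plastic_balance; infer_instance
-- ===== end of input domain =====

-- B replaces A's repeated O(n) middle-sum and in-place deletions by a running total and two indices (O(n) total);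
-- A mutates its argument in place (del), B does not: the equivalence proved here is about the return value only.


-- ===== PORT A =====
-- Literal port of A's while loop as structural recursion on the list state;
-- lst[0] / lst[-1] are in range on every path that reads them (the len==1 / empty checks come first).
def plastic_balance (lst : List Int) : List Int :=
  if lst.length = 1 then
    if PySem.List.pyGetD lst 0 0 + PySem.List.pyGetD lst 0 0 ≠ 0 then [] else lst
  else if lst = [] then []
  else if PySem.List.pyGetD lst 0 0 + PySem.List.pyGetD lst (-1) 0 ≠
      (PySem.List.slice lst (some 1) (some (-1))).sum then
    plastic_balance lst.tail.dropLast   -- del lst[0]; del lst[-1]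
  else lst
termination_by lst.length
decreasing_by
  have h0 : lst ≠ [] := by assumption
  have h00 : lst.length ≠ 0 := fun hz => h0 (List.length_eq_zero_iff.mp hz)
  simp only [List.length_dropLast, List.length_tail]; omega

-- ===== PORT B =====
-- B's while loop: two indices and a running total; lst[i], lst[j] are in range whenever read.
def pbLoop (lst : List Int) (i j total : Int) : List Int :=
  if i < j then
    let ends := PySem.List.pyGetD lst i 0 + PySem.List.pyGetD lst j 0
    if ends = total - ends then PySem.List.slice lst (some i) (some (j + 1))
    else pbLoop lst (i + 1) (j - 1) (total - ends)
  else if i = j ∧ PySem.List.pyGetD lst i 0 = 0 then [PySem.List.pyGetD lst i 0]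
  else []
termination_by (j - i).toNat
decreasing_by omega

def plastic_balance_alt (lst : List Int) : List Int :=
  pbLoop lst 0 ((lst.length : Int) - 1) lst.sum

-- ===== PRECONDITION & SPEC =====
def Spec_plastic_balance (lst : List Int) (out : List Int) : Prop := out = plastic_balance_alt lst
instance (lst : List Int) (out : List Int) : Decidable (Spec_plastic_balance lst out) := by unfold Spec_plastic_balance; infer_instance

-- ===== CLAIM (what is proved, stated in full; the proofs are below) =====
def Claim_equal_plastic_balance : Prop := ∀ (lst : List Int), Dom_plastic_balance lst → Spec_plastic_balance lst (plastic_balance lst)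

-- ===== LEMMAS AND PROOFS =====

theorem slice_one_neg_one (xs : List Int) :
    PySem.List.slice xs (some 1) (some (-1)) = xs.tail.dropLast := by
  simp only [PySem.List.slice, PySem.List.clampIdx, Int.reduceNeg, Int.neg_neg_iff_pos, zero_lt_one,
    ↓reduceIte, add_neg_lt_iff_lt_add, zero_add, Nat.cast_lt_one, List.length_eq_zero_iff,
    Int.reduceLT, Int.toNat_one]
  by_cases h : xs = []
  · simp [h]
  · have hl : xs.length ≠ 0 := fun hz => h (List.length_eq_zero_iff.mp hz)
    simp only [h, ↓reduceIte, List.drop_one, min_eq_left (by omega : 1 ≤ xs.length),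
      List.dropLast_eq_take, List.length_tail]
    congr 1
    omega

theorem seg_decomp (lst : List Int) (a n : Nat) (h2 : 2 ≤ n) (hle : a + n ≤ lst.length) :
    (lst.drop a).take n =
      lst[a]'(by omega) :: ((lst.drop (a + 1)).take (n - 2) ++ [lst[a + n - 1]'(by omega)]) := by
  rw [List.drop_eq_getElem_cons (by omega)]
  obtain ⟨m, rfl⟩ : ∃ m, n = m + 2 := ⟨n - 2, by omega⟩
  rw [List.take_succ_cons, List.take_add_one]
  have hidx : a + (m + 2) - 1 = a + 1 + m := by omega
  have hg : (lst.drop (a + 1))[m]? = some (lst[a + 1 + m]'(by omega)) := by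
    rw [List.getElem?_drop, List.getElem?_eq_getElem (by omega)]
  simp only [hg, hidx]
  simp

theorem key (lst : List Int) (n a : Nat) (hle : a + n ≤ lst.length) :
    pbLoop lst (a : Int) ((a : Int) + (n : Int) - 1) ((lst.drop a).take n).sum =
      plastic_balance ((lst.drop a).take n) := by
  induction n using Nat.strong_induction_on generalizing a with
  | _ n IH =>
  rcases Nat.lt_or_ge n 2 with hn | hn
  · interval_cases n
    · -- n = 0
      rw [pbLoop, if_neg (by omega), if_neg (by rintro ⟨h1, -⟩; omega)]
      rw [plastic_balance]
      simp
    · -- n = 1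
      have ha : a < lst.length := by omega
      have hseg : (lst.drop a).take 1 = [lst[a]'ha] := by
        rw [List.drop_eq_getElem_cons ha]; rfl
      rw [hseg, pbLoop, if_neg (by omega), plastic_balance]
      have hget : PySem.List.pyGetD lst (a : Int) 0 = lst[a]'ha := by
        rw [PySem.List.pyGetD_natCast, List.getD_eq_getElem _ _ ha]
      simp only [hget]
      by_cases hx : lst[a]'ha = 0
      · simp [hx]
      · simp [hx]
  · -- n ≥ 2
    have hd := seg_decomp lst a n hn hle
    set x := lst[a]'(by omega) with hxdef
    set y := lst[a + n - 1]'(by omega) with hydef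
    set mid := (lst.drop (a + 1)).take (n - 2) with hmid
    have hgx : PySem.List.pyGetD lst (a : Int) 0 = x := by
      rw [PySem.List.pyGetD_natCast, List.getD_eq_getElem _ _ (by omega)]
    have hcast : (a : Int) + (n : Int) - 1 = ((a + n - 1 : Nat) : Int) := by omega
    have hgy : PySem.List.pyGetD lst ((a : Int) + (n : Int) - 1) 0 = y := by
      rw [hcast, PySem.List.pyGetD_natCast, List.getD_eq_getElem _ _ (by omega)]
    have hsum : ((lst.drop a).take n).sum = x + (mid.sum + y) := by rw [hd]; simp
    rw [pbLoop]
    rw [if_pos (by omega)]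
    simp only [hgx, hgy, hsum]
    -- A side conditions
    have hlen : ((lst.drop a).take n).length = n := by simp; omega
    by_cases hcond : x + y = x + (mid.sum + y) - (x + y)
    · rw [if_pos hcond]
      rw [plastic_balance]
      rw [if_neg (by rw [hlen]; omega), if_neg (by intro hnil; rw [hnil] at hlen; simp at hlen; omega)]
      rw [hd]
      rw [if_neg ?_]
      · -- slice lst a (a+n) = seg
        have : (a : Int) + (n : Int) - 1 + 1 = (a : Int) + (n : Int) := by ring
        rw [this, PySem.List.slice_natCast_add]
        exact hd
      · -- the ≠ test is false
        rw [not_ne_iff]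
        rw [PySem.List.pyGetD_zero_cons]
        have : (x :: (mid ++ [y]) : List Int) = (x :: mid) ++ [y] := by simp
        rw [this, PySem.List.pyGetD_neg_one_append_singleton, slice_one_neg_one]
        simp
        omega
    · rw [if_neg hcond]
      rw [plastic_balance]
      rw [if_neg (by rw [hlen]; omega), if_neg (by intro hnil; rw [hnil] at hlen; simp at hlen; omega)]
      rw [if_pos ?_]
      · -- both recurse
        have e1 : (a : Int) + 1 = ((a + 1 : Nat) : Int) := by push_cast; ring
        have e2 : (a : Int) + (n : Int) - 1 - 1 = ((a + 1 : Nat) : Int) + ((n - 2 : Nat) : Int) - 1 := by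
          push_cast; omega
        have e3 : x + (mid.sum + y) - (x + y) = mid.sum := by ring
        have etail : ((lst.drop a).take n).tail.dropLast = mid := by rw [hd]; simp
        rw [e1, e2, e3, etail]
        have := IH (n - 2) (by omega) (a + 1) (by omega)
        rw [← hmid] at this
        exact this
      · -- the ≠ test is true
        rw [hd, PySem.List.pyGetD_zero_cons]
        have : (x :: (mid ++ [y]) : List Int) = (x :: mid) ++ [y] := by simp
        rw [this, PySem.List.pyGetD_neg_one_append_singleton, slice_one_neg_one]
        simp
        omega

-- ===== VERDICT (by name: the statement is the Claim_ definition above) =====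
theorem plastic_balance_spec : Claim_equal_plastic_balance := by
  intro lst _
  unfold Spec_plastic_balance plastic_balance_alt
  have h := key lst lst.length 0 (by omega)
  simp at h
  exact h.symm
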